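-- pv_equiv track=rewrite | github.com/hivdb/chatpaper | src/summarize/plot/by_paper.py | rename_paper
-- ===== SOURCE A (Python) =====
-- from collections import defaultdict
-- import string
--
-- def rename_paper(papers):
--
--     new_names = defaultdict(list)
--
--     for paper in papers:
--         new_name = paper.split(',')[0].strip()
--         new_names[new_name].append(paper)
--
--     rename_map = {}
--
--     for name, papers in new_names.items():
--         if len(papers) == 1:
--             rename_map[papers[0]] = name
--             continue
--
--         papers.sort()
--
--         for idx, p in enumerate(papers):
--             suffix = string.ascii_lowercase[idx]
--             rename_map[p] = f"{name}{suffix}"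
--
--     return rename_map
-- ===== SOURCE B (Python) =====
-- import string
-- from itertools import groupby
--
--
-- def rename_paper(papers):
--     keyed = sorted((p.split(',')[0].strip(), p) for p in papers)
--     runs = {key: [p for _, p in grp] for key, grp in groupby(keyed, key=lambda kp: kp[0])}
--
--     rename_map = {}
--
--     for key in dict.fromkeys(p.split(',')[0].strip() for p in papers):
--         group = runs[key]
--         if len(group) == 1:
--             rename_map[group[0]] = key
--         else:
--             for idx, p in enumerate(group):
--                 rename_map[p] = key + string.ascii_lowercase[idx]
--
--     return rename_map
-- ===== Notes on version B (the rewrite author's own statement) =====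
-- stated objective: alternative
-- what changed: A groups papers into a dict of lists and then sorts each group separately; B instead sorts the (key, paper) pairs once globally, splits the sorted list into consecutive equal-key runs (itertools.groupby), and assembles the rename map by looking each first-occurrence key up in the run table.
import Mathlib
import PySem

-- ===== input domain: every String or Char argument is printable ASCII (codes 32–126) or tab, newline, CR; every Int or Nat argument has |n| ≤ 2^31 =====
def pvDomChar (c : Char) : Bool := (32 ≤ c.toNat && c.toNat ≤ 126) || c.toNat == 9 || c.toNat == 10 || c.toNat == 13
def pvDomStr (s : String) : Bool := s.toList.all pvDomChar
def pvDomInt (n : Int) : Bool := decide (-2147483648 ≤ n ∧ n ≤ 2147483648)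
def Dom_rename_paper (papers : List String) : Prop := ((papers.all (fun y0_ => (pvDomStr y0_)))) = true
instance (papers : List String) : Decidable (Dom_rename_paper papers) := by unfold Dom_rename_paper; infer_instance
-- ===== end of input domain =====

-- B replaces A's group-into-dict-then-sort-each-group by sort-all-once-then-split-consecutive-runs
-- (a different decomposition of the same grouping task; same asymptotic cost).

-- string.ascii_lowercase
def pvAsciiLower : List Char := "abcdefghijklmnopqrstuvwxyz".toList

-- paper.split(',')[0].strip(): split(',') always yields a nonempty list, so [0] is its head
def pvKey (paper : String) : String :=
  PySem.Str.strip (((PySem.Str.split? paper ",").getD []).headD "")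

-- ===== PORT A =====
def rename_paper (papers : List String) : List (String × String) :=
  let new_names : PySem.Dict String (List String) :=
    papers.foldl (fun d paper => d.modify (pvKey paper) [] (· ++ [paper])) PySem.Dict.empty
  let rename_map : PySem.Dict String String :=
    new_names.items.foldl (fun rm kv =>
      if kv.2.length = 1 then
        -- papers[0]: guarded by len(papers) == 1, so the head exists
        rm.insert (kv.2.headD "") kv.1
      else
        let ps := PySem.List.sorted kv.2 (fun x => x) false
        (PySem.List.enumerate ps 0).foldl (fun rm ip =>
          -- string.ascii_lowercase[idx]: IndexError for idx ≥ 26 is excluded by Pre_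
          rm.insert ip.2 (kv.1 ++ String.singleton ((PySem.List.pyGet? pvAsciiLower ip.1).getD '?'))) rm)
      PySem.Dict.empty
  rename_map.items

-- ===== PORT B =====
-- itertools.groupby over the sorted key/paper pairs: consecutive runs of equal first components
def pvGroupRuns : List (String × String) → List (String × List String)
  | [] => []
  | (k, p) :: t =>
      (k, p :: (t.takeWhile (fun q => q.1 == k)).map Prod.snd) ::
      pvGroupRuns (t.dropWhile (fun q => q.1 == k))
termination_by l => l.length
decreasing_by
  simp only [List.length_cons]
  exact Nat.lt_succ_of_le (List.length_dropWhile_le _ t)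

def rename_paper_alt (papers : List String) : List (String × String) :=
  let keyed := PySem.List.sorted2 (papers.map (fun p => (pvKey p, p))) Prod.fst Prod.snd false
  let runs : PySem.Dict String (List String) := PySem.Dict.ofList (pvGroupRuns keyed)
  let rename_map : PySem.Dict String String :=
    (PySem.List.dedup (papers.map pvKey)).foldl (fun rm key =>
      let group := runs.getD key []
      if group.length = 1 then
        rm.insert (group.headD "") key
      else
        (PySem.List.enumerate group 0).foldl (fun rm ip =>
          rm.insert ip.2 (key ++ String.singleton ((PySem.List.pyGet? pvAsciiLower ip.1).getD '?'))) rm)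
      PySem.Dict.empty
  rename_map.items

-- ===== PRECONDITION & SPEC =====
-- Pre_ excludes inputs where more than 26 papers share one prefix key: there Python A (and B)
-- raises IndexError on string.ascii_lowercase[idx].
def Pre_rename_paper (papers : List String) : Prop :=
  ∀ p ∈ papers, papers.countP (fun q => pvKey q == pvKey p) ≤ 26
instance (papers : List String) : Decidable (Pre_rename_paper papers) := by
  unfold Pre_rename_paper; infer_instance

def pvWitness_rename_paper : List String :=
  ["Smith, 2020", "Smith , 2021", "Jones 1999"]

def Spec_rename_paper (papers : List String) (out : List (String × String)) : Prop :=
  out = rename_paper_alt papers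
instance (papers : List String) (out : List (String × String)) : Decidable (Spec_rename_paper papers out) := by
  unfold Spec_rename_paper; infer_instance

-- ===== CLAIM (what is proved, stated in full; the proofs are below) =====
def Claim_equal_rename_paper : Prop :=
  ∀ (papers : List String), Dom_rename_paper papers → Pre_rename_paper papers →
    Spec_rename_paper papers (rename_paper papers)

-- ===== LEMMAS AND PROOFS =====

lemma pvGetD_foldl_insert_congr {κ ν : Type} [BEq κ] [LawfulBEq κ] [DecidableEq κ]
    (l : List (κ × ν)) (d₁ d₂ : PySem.Dict κ ν) (k : κ) (d0 : ν)
    (h : d₁.getD k d0 = d₂.getD k d0) :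
    (l.foldl (fun d p => d.insert p.1 p.2) d₁).getD k d0
      = (l.foldl (fun d p => d.insert p.1 p.2) d₂).getD k d0 := by
  induction l generalizing d₁ d₂ with
  | nil => simpa using h
  | cons p t ih =>
    simp only [List.foldl_cons]
    exact ih _ _ (by rw [PySem.Dict.getD_insert, PySem.Dict.getD_insert, h])

lemma pvGetD_foldl_insert_not_mem {κ ν : Type} [BEq κ] [LawfulBEq κ] [DecidableEq κ]
    (l : List (κ × ν)) (d : PySem.Dict κ ν) (k : κ) (d0 : ν)
    (h : ∀ p ∈ l, p.1 ≠ k) :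
    (l.foldl (fun d p => d.insert p.1 p.2) d).getD k d0 = d.getD k d0 := by
  induction l generalizing d with
  | nil => rfl
  | cons p t ih =>
    simp only [List.foldl_cons]
    rw [ih _ (fun q hq => h q (List.mem_cons_of_mem _ hq)), PySem.Dict.getD_insert,
      if_neg (Ne.symm (h p (List.mem_cons_self)))]

lemma pvGroupRuns_keys_sub : ∀ (l : List (String × String)) (kv : String × List String),
    kv ∈ pvGroupRuns l → kv.1 ∈ l.map Prod.fst := by
  intro l
  induction l using pvGroupRuns.induct with
  | case1 => simp [pvGroupRuns]
  | case2 k p t ih =>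
    intro kv hkv
    rw [pvGroupRuns] at hkv
    rcases List.mem_cons.mp hkv with h | h
    · simp [h]
    · exact List.mem_cons_of_mem _ (List.map_subset _ (List.dropWhile_sublist _).subset (ih kv h))

lemma pvGroupRuns_getD_aux : ∀ (n : Nat) (l : List (String × String)), l.length ≤ n →
    l.Pairwise (fun a b => a.1 ≤ b.1) → ∀ k,
    (PySem.Dict.ofList (pvGroupRuns l)).getD k []
      = (l.filter (fun q => q.1 == k)).map Prod.snd := by
  intro n
  induction n with
  | zero =>
    intro l hl _ k
    have hnil : l = [] := List.eq_nil_of_length_eq_zero (Nat.le_zero.mp hl)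
    subst hnil
    simp [pvGroupRuns, PySem.Dict.ofList, PySem.Dict.update, PySem.Dict.getD_empty]
  | succ n ih =>
    intro l hl hp k
    match l with
    | [] => simp [pvGroupRuns, PySem.Dict.ofList, PySem.Dict.update, PySem.Dict.getD_empty]
    | (k0, p) :: t =>
      have hpt : t.Pairwise (fun a b : String × String => a.1 ≤ b.1) :=
        (List.pairwise_cons.mp hp).2
      have hk0 : ∀ z ∈ t, k0 ≤ z.1 := fun z hz => (List.pairwise_cons.mp hp).1 z hz
      have hrun : ∀ q ∈ t.takeWhile (fun q => q.1 == k0), q.1 = k0 := by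
        intro q hq
        simpa using List.mem_takeWhile_imp hq
      have hrest : ∀ z ∈ t.dropWhile (fun q => q.1 == k0), z.1 ≠ k0 := by
        intro z hz
        match hr : t.dropWhile (fun q => q.1 == k0) with
        | [] => rw [hr] at hz; exact absurd hz (List.not_mem_nil)
        | h0 :: r =>
          have hne : ¬ (h0.1 == k0) = true := by
            have := List.head_dropWhile_not (fun q : String × String => q.1 == k0) (l := t)
              (w := by rw [hr]; exact List.cons_ne_nil _ _)
            simp only [hr, List.head_cons] at this
            simp [this]
          have hne' : h0.1 ≠ k0 := by simpa using hne
          have h0t : h0 ∈ t := (List.dropWhile_sublist _).subset (by rw [hr]; exact List.mem_cons_self)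
          have hk0h : k0 < h0.1 := lt_of_le_of_ne (hk0 h0 h0t) (Ne.symm hne')
          rw [hr] at hz
          rcases List.mem_cons.mp hz with rfl | hzr
          · exact hne'
          · have hpr : (h0 :: r).Pairwise (fun a b : String × String => a.1 ≤ b.1) := by
              rw [← hr]; exact List.Pairwise.sublist (List.dropWhile_sublist _) hpt
            have hle : h0.1 ≤ z.1 := (List.pairwise_cons.mp hpr).1 z hzr
            have hzk : k0 < z.1 := lt_of_lt_of_le hk0h hle
            intro hc
            rw [hc] at hzk
            exact lt_irrefl _ hzk
      rw [pvGroupRuns]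
      have hofl : ∀ (v0 : List String) (rs : List (String × List String)),
          PySem.Dict.ofList ((k0, v0) :: rs)
            = rs.foldl (fun d q => d.insert q.1 q.2) (PySem.Dict.empty.insert k0 v0) := by
        intro v0 rs
        simp [PySem.Dict.ofList, PySem.Dict.update]
      rw [hofl]
      by_cases hk : k = k0
      · subst hk
        rw [pvGetD_foldl_insert_not_mem _ _ _ _ (by
          intro pr hpr
          have := pvGroupRuns_keys_sub _ pr hpr
          rcases List.mem_map.mp this with ⟨z, hz, hzeq⟩
          exact hzeq ▸ hrest z hz)]
        rw [PySem.Dict.getD_insert_self]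
        have h1 : List.filter (fun q => q.1 == k) ((k, p) :: t)
            = (k, p) :: List.takeWhile (fun q => q.1 == k) t := by
          rw [List.filter_cons]
          simp only [BEq.rfl, if_true]
          conv_lhs => rw [← List.takeWhile_append_dropWhile
            (p := fun q : String × String => q.1 == k) (l := t)]
          rw [List.filter_append,
            List.filter_eq_self.mpr (fun q hq => by simpa using List.mem_takeWhile_imp hq),
            List.filter_eq_nil_iff.mpr (fun z hz => by simp [hrest z hz]),
            List.append_nil]
        rw [h1]
        simp
      · rw [pvGetD_foldl_insert_congr _ _ PySem.Dict.empty _ _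
          (by rw [PySem.Dict.getD_insert, if_neg hk])]
        have : (pvGroupRuns (t.dropWhile (fun q => q.1 == k0))).foldl
              (fun d q => d.insert q.1 q.2) PySem.Dict.empty
            = PySem.Dict.ofList (pvGroupRuns (t.dropWhile (fun q => q.1 == k0))) := by
          simp [PySem.Dict.ofList, PySem.Dict.update]
        rw [this]
        have hlen : (t.dropWhile (fun q => q.1 == k0)).length ≤ n := by
          have h1 := List.length_dropWhile_le (fun q : String × String => q.1 == k0) t
          simp only [List.length_cons] at hl
          omega
        rw [ih _ hlen (List.Pairwise.sublist (List.dropWhile_sublist _) hpt)]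
        have h1 : List.filter (fun q => q.1 == k) ((k0, p) :: t)
            = List.filter (fun q => q.1 == k) (t.dropWhile (fun q => q.1 == k0)) := by
          rw [List.filter_cons]
          simp only [show ((k0 : String) == k) = false from by simp [Ne.symm hk], if_false,
            Bool.false_eq_true]
          conv_lhs => rw [← List.takeWhile_append_dropWhile
            (p := fun q : String × String => q.1 == k0) (l := t)]
          rw [List.filter_append,
            List.filter_eq_nil_iff.mpr (fun q hq => by simp [hrun q hq, Ne.symm hk]),
            List.nil_append]
        rw [h1]

lemma pvGroupRuns_getD (l : List (String × String))
    (hp : l.Pairwise (fun a b => a.1 ≤ b.1)) (k : String) :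
    (PySem.Dict.ofList (pvGroupRuns l)).getD k []
      = (l.filter (fun q => q.1 == k)).map Prod.snd :=
  pvGroupRuns_getD_aux l.length l le_rfl hp k

-- Python tuple comparison on (key, paper) pairs is the lexicographic order
lemma pvSorted2_eq_sorted_toLex (xs : List (String × String)) :
    PySem.List.sorted2 xs Prod.fst Prod.snd false
      = PySem.List.sorted xs (fun q => toLex q) false := by
  have hb : (fun a b : String × String =>
        (decide (a.1 < b.1) || (!decide (b.1 < a.1) && decide (a.2 < b.2))))
      = (fun a b : String × String => decide (toLex a < toLex b)) := by
    funext a b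
    rcases lt_trichotomy a.1 b.1 with h | h | h
    · simp [Prod.Lex.lt_iff, h]
    · simp [Prod.Lex.lt_iff, h]
    · have h1 : ¬ a.1 < b.1 := not_lt_of_gt h
      have h2 : ¬ a.1 = b.1 := h.ne'
      simp only [Prod.Lex.lt_iff]
      simp [h1, h2, h]
  rw [PySem.List.sorted_eq_foldl_insertBy]
  simp only [PySem.List.sorted2, Bool.false_eq_true, if_false, hb]

-- A's first loop: keys in first-occurrence order, each mapped to the filtered sub-list
lemma pvA_new_names (papers : List String) :
    (papers.foldl (fun d paper => d.modify (pvKey paper) [] (· ++ [paper])) PySem.Dict.empty).items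
      = (PySem.List.dedup (papers.map pvKey)).map
          (fun k => (k, papers.filter (fun p => pvKey p == k))) := by
  have hmap : papers.foldl (fun d paper => d.modify (pvKey paper) [] (· ++ [paper])) PySem.Dict.empty
      = (papers.map (fun p => (pvKey p, p))).foldl
          (fun d q => d.modify q.1 [] (fun v => v ++ [q.2])) PySem.Dict.empty := by
    rw [List.foldl_map]
  have hnd : (papers.foldl (fun d paper => d.modify (pvKey paper) [] (· ++ [paper]))
      PySem.Dict.empty).keys.Nodup :=
    PySem.Dict.nodup_keys_foldl_modify_key papers pvKey [] (fun _ p => (· ++ [p]))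
      PySem.Dict.empty (by simp)
  have hkeys : (papers.foldl (fun d paper => d.modify (pvKey paper) [] (· ++ [paper]))
      PySem.Dict.empty).keys = PySem.List.dedup (papers.map pvKey) := by
    rw [PySem.Dict.keys_foldl_modify_key papers pvKey [] (fun _ p => (· ++ [p]))]
    rw [PySem.List.dedup_eq_ofList, PySem.Set.ofList_eq_foldl]
    simp [PySem.Set.update]
  have hget : ∀ k, (papers.foldl (fun d paper => d.modify (pvKey paper) [] (· ++ [paper]))
      PySem.Dict.empty).getD k [] = papers.filter (fun p => pvKey p == k) := by
    intro k
    rw [hmap, PySem.Dict.getD_foldl_modify_append, PySem.Dict.getD_empty, List.nil_append,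
      List.filter_map, List.map_map]
    simp [Function.comp_def]
  rw [PySem.Dict.items_eq_map_keys _ hnd [], hkeys]
  exact List.map_congr_left (fun k _ => by rw [hget k])

-- the sorted key/paper list is sorted on its first components
lemma pvKeyed_pairwise_fst (papers : List String) :
    (PySem.List.sorted2 (papers.map (fun p => (pvKey p, p))) Prod.fst Prod.snd false).Pairwise
      (fun a b => a.1 ≤ b.1) := by
  rw [pvSorted2_eq_sorted_toLex]
  apply (PySem.List.sorted_pairwise _ (fun q : String × String => toLex q)).imp
  intro a b h
  rcases Prod.Lex.le_iff.mp h with h | h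
  · exact le_of_lt h
  · exact le_of_eq h.1

-- B's run for key k is A's group for k, sorted
lemma pvGroupB_eq (papers : List String) (k : String) :
    ((PySem.List.sorted2 (papers.map (fun p => (pvKey p, p))) Prod.fst Prod.snd false).filter
        (fun q => q.1 == k)).map Prod.snd
      = PySem.List.sorted (papers.filter (fun p => pvKey p == k)) (fun x => x) false := by
  rw [pvSorted2_eq_sorted_toLex]
  have h2 : (papers.map (fun p => (pvKey p, p))).filter (fun q => q.1 == k)
      = (papers.filter (fun p => pvKey p == k)).map (fun p => (pvKey p, p)) := by
    rw [List.filter_map]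
    simp [Function.comp_def]
  have hperm : (((PySem.List.sorted (papers.map (fun p => (pvKey p, p)))
        (fun q => toLex q) false).filter (fun q => q.1 == k)).map Prod.snd).Perm
      (papers.filter (fun p => pvKey p == k)) := by
    have h1 := (PySem.List.sorted_perm (papers.map (fun p => (pvKey p, p)))
      (fun q => toLex q) false).filter (fun q => q.1 == k)
    have h3 := h1.map Prod.snd
    rw [h2, List.map_map] at h3
    simpa [Function.comp_def] using h3
  have hpair : (((PySem.List.sorted (papers.map (fun p => (pvKey p, p)))
        (fun q => toLex q) false).filter (fun q => q.1 == k)).map Prod.snd).Pairwise (· ≤ ·) := by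
    rw [List.pairwise_map]
    apply List.Pairwise.imp_of_mem ?_
      ((PySem.List.sorted_pairwise _ (fun q : String × String => toLex q)).filter _)
    intro a b ha hb hlex
    have ha' : a.1 = k := by simpa using (List.mem_filter.mp ha).2
    have hb' : b.1 = k := by simpa using (List.mem_filter.mp hb).2
    rcases Prod.Lex.le_iff.mp hlex with h | h
    · simp only [ofLex_toLex] at h
      rw [ha', hb'] at h
      exact absurd h (lt_irrefl k)
    · simpa using h.2
  have hpair2 : (PySem.List.sorted (papers.filter (fun p => pvKey p == k))
      (fun x => x) false).Pairwise (· ≤ ·) := PySem.List.sorted_pairwise _ _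
  have hperm2 := PySem.List.sorted_perm (papers.filter (fun p => pvKey p == k)) (fun x => x) false
  exact List.Perm.eq_of_pairwise (fun a b _ _ hab hba => le_antisymm hab hba)
    hpair hpair2 (hperm.trans hperm2.symm)

-- sorting a singleton is the identity
lemma pvSorted_singleton (a : String) :
    PySem.List.sorted [a] (fun x => x) false = [a] :=
  PySem.List.sorted_eq_of_perm_of_pairwise_lt [a] [a] (fun x => x)
    (List.Perm.refl _) (List.pairwise_singleton _ _)

-- ===== VERDICT (by name: the statement is the Claim_ definition above) =====
theorem rename_paper_spec : Claim_equal_rename_paper := by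
  unfold Claim_equal_rename_paper
  intro papers _ _
  unfold Spec_rename_paper
  simp only [rename_paper, rename_paper_alt]
  congr 1
  rw [pvA_new_names, List.foldl_map]
  apply PySem.List.foldl_congr_mem
  intro acc k _
  have hgB : (PySem.Dict.ofList (pvGroupRuns
        (PySem.List.sorted2 (papers.map (fun p => (pvKey p, p))) Prod.fst Prod.snd false))).getD k []
      = PySem.List.sorted (papers.filter (fun p => pvKey p == k)) (fun x => x) false := by
    rw [pvGroupRuns_getD _ (pvKeyed_pairwise_fst papers) k, pvGroupB_eq]
  simp only [hgB]
  have hlen : (PySem.List.sorted (papers.filter (fun p => pvKey p == k)) (fun x => x) false).length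
      = (papers.filter (fun p => pvKey p == k)).length :=
    (PySem.List.sorted_perm _ _ _).length_eq
  by_cases h1 : (papers.filter (fun p => pvKey p == k)).length = 1
  · rcases List.length_eq_one_iff.mp h1 with ⟨a, ha⟩
    rw [ha, pvSorted_singleton]
  · have hB : ¬ (PySem.List.sorted (papers.filter (fun p => pvKey p == k))
        (fun x => x) false).length = 1 := by rw [hlen]; exact h1
    simp only [if_neg h1, if_neg hB]
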